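-- pv_equiv track=rewrite | github.com/mmoneib/Pretext | pretext/actions/tokenizer.py | tokenize_by_words
-- ===== SOURCE A (Python) =====
-- def tokenize_by_words(text, numOfWords): # Another function as one char doesn't need a buffer.
--   tokens=[]
--   word=""
--   buff=""
--   count=0
--   for c in text:
--     if c == ' ' or c == '\n': #End of word or empty space.
--       if word.endswith(' ') == False and word.endswith('\n') == False: # That it is not a string of empty spaces.
--         if count == numOfWords-1:
--           buff+=word # No space as it is the last word meant to be in the buffer.
--           tokens.append(buff)
--           buff=""
--           word=""
--           count=0
--         else:
--           buff+=word + " " # Space before the next word.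
--           word=""
--           count=count+1
--       #else:
--         #word+=c # Adding empty space to empty spaces.
--     else:
--       word+=c
--   if word.isspace() == False and len(word)>0:
--     buff+=word
--     tokens.append(buff)
--   return tokens
-- ===== SOURCE B (Python) =====
-- def tokenize_by_words(text, numOfWords):
--     words = text.replace('\n', ' ').split(' ')
--     committed, last = words[:-1], words[-1]
--     tokens = []
--     i = 0
--     while numOfWords >= 1 and len(committed) - i >= numOfWords:
--         tokens.append(" ".join(committed[i:i + numOfWords]))
--         i += numOfWords
--     if not last.isspace() and len(last) > 0:
--         tokens.append(" ".join(committed[i:] + [last]))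
--     return tokens
-- ===== Notes on version B (the rewrite author's own statement) =====
-- stated objective: simpler
-- what changed: A's char-by-char state machine (word/buff/count updated per character with endswith guards) is replaced by a staged decomposition: split the text into words once via replace('\n',' ').split(' ') (which keeps empty pieces, matching A's separator handling exactly), then a while loop that slices out each chunk of numOfWords committed words by index and joins it with ' '.join, plus one final-word guard; no per-character buffer state remains.
import Mathlib
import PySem

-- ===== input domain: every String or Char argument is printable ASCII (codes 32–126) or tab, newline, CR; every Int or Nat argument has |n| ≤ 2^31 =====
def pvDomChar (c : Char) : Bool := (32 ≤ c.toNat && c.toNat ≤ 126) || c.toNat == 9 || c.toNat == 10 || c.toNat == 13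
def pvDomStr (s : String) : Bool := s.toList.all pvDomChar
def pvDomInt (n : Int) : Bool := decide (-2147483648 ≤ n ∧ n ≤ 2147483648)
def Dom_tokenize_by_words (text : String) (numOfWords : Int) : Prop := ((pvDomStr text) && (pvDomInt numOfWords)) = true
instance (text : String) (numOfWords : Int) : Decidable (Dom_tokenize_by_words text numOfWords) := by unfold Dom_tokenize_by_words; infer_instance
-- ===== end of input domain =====

-- B replaces A's char-by-char state machine by: split the text into words once, then slice out
-- chunks of numOfWords words with an index-advancing loop and join each chunk with spaces
-- (objective: simpler decomposition); A = B everywhere, return value only (no mutation involved).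

-- ===== PORT A =====
-- strings are carried as List Char (PySem convention); tokens become String only at the very end
def tokAstep (numOfWords : Int) (s : List (List Char) × List Char × List Char × Int) (c : Char) :
    List (List Char) × List Char × List Char × Int :=
  let (tokens, word, buff, count) := s
  if c = ' ' ∨ c = '\n' then
    if PySem.Chars.endswith word [' '] = false ∧ PySem.Chars.endswith word ['\n'] = false then
      if count = numOfWords - 1 then
        (tokens ++ [buff ++ word], [], [], 0)
      else
        (tokens, [], buff ++ word ++ [' '], count + 1)
    else (tokens, word, buff, count)
  else (tokens, word ++ [c], buff, count)

def tokenize_by_words (text : String) (numOfWords : Int) : List String :=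
  let s := text.toList.foldl (tokAstep numOfWords) ([], [], [], 0)
  let tokens := if PySem.Chars.strIsspace s.2.1 = false ∧ s.2.1.length > 0 then s.1 ++ [s.2.2.1 ++ s.2.1] else s.1
  tokens.map String.ofList

-- ===== PORT B =====
-- the while loop: tokens/i are the loop state; i advances by numOfWords past each emitted chunk
def tokChunks (n : Int) (committed : List (List Char)) (tokens : List (List Char)) (i : Nat) :
    List (List Char) × Nat :=
  if _h : 1 ≤ n ∧ n ≤ (committed.length : Int) - i then
    tokChunks n committed
      (tokens ++ [PySem.Chars.join [' '] (PySem.List.slice committed (some (i : Int)) (some ((i : Int) + n)))])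
      (i + n.toNat)
  else (tokens, i)
termination_by committed.length - i
decreasing_by omega

def tokenize_by_words_alt (text : String) (numOfWords : Int) : List String :=
  let words := PySem.Chars.splitOn (PySem.Chars.replace text.toList ['\n'] [' ']) [' ']
  let committed := words.dropLast
  let last := words.getLastD []   -- words[-1]: split always returns a nonempty list
  let s := tokChunks numOfWords committed [] 0
  let tokens :=
    if PySem.Chars.strIsspace last = false ∧ last.length > 0 then
      s.1 ++ [PySem.Chars.join [' '] (PySem.List.slice committed (some (s.2 : Int)) none ++ [last])]
    else s.1
  tokens.map String.ofList

-- ===== PRECONDITION & SPEC =====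
def Spec_tokenize_by_words (text : String) (numOfWords : Int) (out : List String) : Prop := out = tokenize_by_words_alt text numOfWords
instance (text : String) (numOfWords : Int) (out : List String) : Decidable (Spec_tokenize_by_words text numOfWords out) := by unfold Spec_tokenize_by_words; infer_instance

-- ===== CLAIM (what is proved, stated in full; the proofs are below) =====
def Claim_equal_tokenize_by_words : Prop := ∀ (text : String) (numOfWords : Int), Dom_tokenize_by_words text numOfWords → Spec_tokenize_by_words text numOfWords (tokenize_by_words text numOfWords)

-- ===== LEMMAS AND PROOFS =====

def pvSubst (c : Char) : Char := if c = '\n' then ' ' else c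

lemma replace_go_newline (l : List Char) :
    ∀ (fuel : Nat) (acc : List Char), l.length ≤ fuel →
    PySem.Chars.replace.go ['\n'] [' '] fuel l acc = acc.reverse ++ l.map pvSubst := by
  induction l with
  | nil => intro fuel acc _; cases fuel <;> simp [PySem.Chars.replace.go]
  | cons c t ih =>
    intro fuel acc hf
    cases fuel with
    | zero => simp at hf
    | succ fuel =>
      by_cases hc : c = '\n'
      · subst hc
        rw [show PySem.Chars.replace.go ['\n'] [' '] (fuel+1) ('\n' :: t) acc
              = PySem.Chars.replace.go ['\n'] [' '] fuel t (' ' :: acc) from by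
            simp [PySem.Chars.replace.go, List.isPrefixOf]]
        rw [ih fuel (' ' :: acc) (by simpa using Nat.le_of_succ_le_succ hf)]
        simp [pvSubst]
      · have hc' : ¬ '\n' = c := fun h => hc h.symm
        rw [show PySem.Chars.replace.go ['\n'] [' '] (fuel+1) (c :: t) acc
              = PySem.Chars.replace.go ['\n'] [' '] fuel t (c :: acc) from by
            simp [PySem.Chars.replace.go, List.isPrefixOf, hc']]
        rw [ih fuel (c :: acc) (by simpa using Nat.le_of_succ_le_succ hf)]
        simp [pvSubst, hc]

lemma replace_newline (s : List Char) :
    PySem.Chars.replace s ['\n'] [' '] = s.map pvSubst := by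
  simpa using replace_go_newline s s.length [] le_rfl

-- structural characterisation of split(' '): w is the piece accumulated so far
def pySplit (w : List Char) : List Char → List (List Char)
  | [] => [w]
  | c :: rest => if c = ' ' then w :: pySplit [] rest else pySplit (w ++ [c]) rest

lemma splitOn_go_space (l : List Char) :
    ∀ (fuel : Nat) (cur : List Char) (acc : List (List Char)), l.length ≤ fuel →
    PySem.Chars.splitOn.go [' '] fuel l cur acc = acc.reverse ++ pySplit cur.reverse l := by
  induction l with
  | nil => intro fuel cur acc _; cases fuel <;> simp [PySem.Chars.splitOn.go, pySplit]
  | cons c t ih =>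
    intro fuel cur acc hf
    cases fuel with
    | zero => simp at hf
    | succ fuel =>
      by_cases hc : c = ' '
      · subst hc
        rw [show PySem.Chars.splitOn.go [' '] (fuel+1) (' ' :: t) cur acc
              = PySem.Chars.splitOn.go [' '] fuel t [] (cur.reverse :: acc) from by
            simp [PySem.Chars.splitOn.go, List.isPrefixOf]]
        rw [ih fuel [] (cur.reverse :: acc) (by simpa using Nat.le_of_succ_le_succ hf)]
        simp [pySplit]
      · have hc' : ¬ ' ' = c := fun h => hc h.symm
        rw [show PySem.Chars.splitOn.go [' '] (fuel+1) (c :: t) cur acc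
              = PySem.Chars.splitOn.go [' '] fuel t (c :: cur) acc from by
            simp [PySem.Chars.splitOn.go, List.isPrefixOf, hc']]
        rw [ih fuel (c :: cur) acc (by simpa using Nat.le_of_succ_le_succ hf)]
        simp [pySplit, hc]

lemma splitOn_space (s : List Char) : PySem.Chars.splitOn s [' '] = pySplit [] s := by
  simpa using splitOn_go_space s (s.length + 1) [] [] (Nat.le_succ _)

lemma pySplit_ne_nil (w : List Char) (l : List Char) : pySplit w l ≠ [] := by
  induction l generalizing w with
  | nil => simp [pySplit]
  | cons c rest ih => by_cases h : c = ' ' <;> simp [pySplit, h, ih]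

-- proof-side middle man I: A's loop with the committed-words grouping made explicit
def tokBstep (numOfWords : Int) (s : List (List Char) × List Char × Int) (word : List Char) :
    List (List Char) × List Char × Int :=
  let (tokens, buff, count) := s
  if count = numOfWords - 1 then (tokens ++ [buff ++ word], [], 0)
  else (tokens, buff ++ word ++ [' '], count + 1)

def finishF (n : Int) (s : List (List Char) × List Char × Int) : List (List Char) → List (List Char)
  | [] => s.1
  | [w] => if PySem.Chars.strIsspace w = false ∧ w.length > 0 then s.1 ++ [s.2.1 ++ w] else s.1
  | w :: w' :: ws => finishF n (tokBstep n s w) (w' :: ws)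

lemma finishF_cons (n : Int) (s : List (List Char) × List Char × Int) (w : List Char)
    (L : List (List Char)) (h : L ≠ []) : finishF n s (w :: L) = finishF n (tokBstep n s w) L := by
  cases L with
  | nil => exact absurd rfl h
  | cons w' ws => rfl

lemma endswith_single_false (w : List Char) (c : Char) (h : c ∉ w) :
    PySem.Chars.endswith w [c] = false := by
  by_contra hc
  rw [Bool.not_eq_false, PySem.Chars.endswith_iff] at hc
  exact h (hc.mem (by simp))

-- the key invariant on the A side: A's fold over the remaining characters computes finishF of the split
lemma A_fold_eq (n : Int) (cs : List Char) :
    ∀ (word : List Char) (tokens : List (List Char)) (buff : List Char) (count : Int),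
    ' ' ∉ word → '\n' ∉ word →
    (if PySem.Chars.strIsspace (cs.foldl (tokAstep n) (tokens, word, buff, count)).2.1 = false ∧
        (cs.foldl (tokAstep n) (tokens, word, buff, count)).2.1.length > 0
     then (cs.foldl (tokAstep n) (tokens, word, buff, count)).1 ++
          [(cs.foldl (tokAstep n) (tokens, word, buff, count)).2.2.1 ++ (cs.foldl (tokAstep n) (tokens, word, buff, count)).2.1]
     else (cs.foldl (tokAstep n) (tokens, word, buff, count)).1)
    = finishF n (tokens, buff, count) (pySplit word (cs.map pvSubst)) := by
  induction cs with
  | nil =>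
    intro word tokens buff count _ _
    simp [pySplit, finishF]
  | cons c rest ih =>
    intro word tokens buff count hsp hnl
    by_cases hc : c = ' ' ∨ c = '\n'
    · have hmap : pvSubst c = ' ' := by rcases hc with h | h <;> simp [pvSubst, h]
      have hew1 := endswith_single_false word ' ' hsp
      have hew2 := endswith_single_false word '\n' hnl
      rw [List.map_cons, hmap,
        show pySplit word (' ' :: rest.map pvSubst) = word :: pySplit [] (rest.map pvSubst) from by
          simp [pySplit],
        finishF_cons n _ word _ (pySplit_ne_nil [] _)]
      simp only [List.foldl_cons]
      by_cases hcnt : count = n - 1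
      · rw [show tokAstep n (tokens, word, buff, count) c = (tokens ++ [buff ++ word], [], [], 0) from by
            simp [tokAstep, hc, hew1, hew2, hcnt],
          show tokBstep n (tokens, buff, count) word = (tokens ++ [buff ++ word], [], 0) from by
            simp [tokBstep, hcnt]]
        exact ih [] _ _ _ (by simp) (by simp)
      · rw [show tokAstep n (tokens, word, buff, count) c = (tokens, [], buff ++ word ++ [' '], count + 1) from by
            simp [tokAstep, hc, hew1, hew2, hcnt],
          show tokBstep n (tokens, buff, count) word = (tokens, buff ++ word ++ [' '], count + 1) from by
            simp [tokBstep, hcnt]]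
        exact ih [] _ _ _ (by simp) (by simp)
    · push Not at hc
      rw [List.map_cons, show pvSubst c = c from by simp [pvSubst, hc.2],
        show pySplit word (c :: rest.map pvSubst) = pySplit (word ++ [c]) (rest.map pvSubst) from by
          simp [pySplit, hc.1]]
      simp only [List.foldl_cons]
      rw [show tokAstep n (tokens, word, buff, count) c = (tokens, word ++ [c], buff, count) from by
          simp [tokAstep, hc.1, hc.2]]
      have hsp' : ' ' ∉ word ++ [c] := by
        simp only [List.mem_append, List.mem_singleton]
        rintro (h | h)
        · exact hsp h
        · exact hc.1 h.symm
      have hnl' : '\n' ∉ word ++ [c] := by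
        simp only [List.mem_append, List.mem_singleton]
        rintro (h | h)
        · exact hnl h
        · exact hc.2 h.symm
      exact ih (word ++ [c]) _ _ _ hsp' hnl'

-- proof-side middle man II: the chunk grouping as a structural recursion
def grpSpec (n : Int) (committed : List (List Char)) (last : List Char) : List (List Char) :=
  if _h : 1 ≤ n ∧ n ≤ (committed.length : Int) then
    PySem.Chars.join [' '] (committed.take n.toNat) :: grpSpec n (committed.drop n.toNat) last
  else if PySem.Chars.strIsspace last = false ∧ last.length > 0 then
    [PySem.Chars.join [' '] (committed ++ [last])]
  else []
termination_by committed.length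
decreasing_by simp; omega

-- buff always holds the pending words each with a trailing space
def joinTrail (p : List (List Char)) : List Char := (p.map (· ++ [' '])).flatten

lemma joinsp_append_single (p : List (List Char)) (w : List Char) :
    PySem.Chars.join [' '] (p ++ [w]) = joinTrail p ++ w := by
  induction p with
  | nil => simp [joinTrail, PySem.Chars.join_singleton]
  | cons a p ih =>
    cases p with
    | nil => simp [joinTrail, PySem.Chars.join_cons_cons, PySem.Chars.join_singleton]
    | cons b q =>
      simp only [List.cons_append] at ih ⊢
      rw [PySem.Chars.join_cons_cons, ih]
      simp [joinTrail]

-- B's while loop, with the final-word guard folded in, computes grpSpec on the not-yet-consumed words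
lemma tokChunks_spec (n : Int) (committed : List (List Char)) (last : List Char) :
    ∀ (i : Nat) (tokens : List (List Char)),
    (if PySem.Chars.strIsspace last = false ∧ last.length > 0
     then (tokChunks n committed tokens i).1 ++
          [PySem.Chars.join [' '] (PySem.List.slice committed (some ((tokChunks n committed tokens i).2 : Int)) none ++ [last])]
     else (tokChunks n committed tokens i).1)
    = tokens ++ grpSpec n (committed.drop i) last := by
  suffices H : ∀ (k i : Nat) (tokens : List (List Char)), committed.length - i ≤ k →
      (if PySem.Chars.strIsspace last = false ∧ last.length > 0
       then (tokChunks n committed tokens i).1 ++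
            [PySem.Chars.join [' '] (PySem.List.slice committed (some ((tokChunks n committed tokens i).2 : Int)) none ++ [last])]
       else (tokChunks n committed tokens i).1)
      = tokens ++ grpSpec n (committed.drop i) last by
    intro i tokens; exact H (committed.length - i) i tokens le_rfl
  intro k
  induction k with
  | zero =>
    intro i tokens hk
    have hcond : ¬ (1 ≤ n ∧ n ≤ (committed.length : Int) - i) := by
      rintro ⟨h1, h2⟩; omega
    rw [tokChunks, dif_neg hcond]
    have hcond' : ¬ (1 ≤ n ∧ n ≤ ((committed.drop i).length : Int)) := by
      simp only [List.length_drop]; rintro ⟨h1, h2⟩; omega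
    rw [grpSpec, dif_neg hcond']
    rw [PySem.List.slice_from committed (by exact_mod_cast Int.natCast_nonneg i)]
    simp only [Int.toNat_natCast]
    split_ifs <;> simp
  | succ k ih =>
    intro i tokens hk
    by_cases hcond : 1 ≤ n ∧ n ≤ (committed.length : Int) - i
    · rw [tokChunks, dif_pos hcond]
      have hcond' : 1 ≤ n ∧ n ≤ ((committed.drop i).length : Int) := by
        simp only [List.length_drop]; omega
      conv_rhs => rw [grpSpec]
      rw [dif_pos hcond']
      rw [ih (i + n.toNat) _ (by omega)]
      rw [PySem.List.slice_toNat committed (by exact_mod_cast Int.natCast_nonneg i) (by omega)]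
      have h1 : ((i : Int) + n).toNat - ((i : Int)).toNat = n.toNat := by omega
      have h2 : ((i : Int)).toNat = i := by omega
      rw [h2] at h1 ⊢
      rw [h1]
      rw [show (committed.drop i).drop n.toNat = committed.drop (i + n.toNat) from List.drop_drop]
      simp
    · rw [tokChunks, dif_neg hcond]
      have hcond' : ¬ (1 ≤ n ∧ n ≤ ((committed.drop i).length : Int)) := by
        simp only [List.length_drop]; rintro ⟨h1, h2⟩
        exact hcond ⟨h1, by omega⟩
      rw [grpSpec, dif_neg hcond']
      rw [PySem.List.slice_from committed (by exact_mod_cast Int.natCast_nonneg i)]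
      simp only [Int.toNat_natCast]
      split_ifs <;> simp

-- A's grouping loop equals the chunk recursion
lemma getLastD_cons_of_ne (a : List Char) (l : List (List Char)) (h : l ≠ []) :
    (a :: l).getLastD [] = l.getLastD [] := by
  cases l with
  | nil => exact absurd rfl h
  | cons b t => simp

lemma finish_grp (n : Int) : ∀ (ws : List (List Char)), ws ≠ [] →
    ∀ (tokens pending : List (List Char)),
    (1 ≤ n → (pending.length : Int) ≤ n - 1) →
    finishF n (tokens, joinTrail pending, (pending.length : Int)) ws
      = tokens ++ grpSpec n (pending ++ ws.dropLast) (ws.getLastD []) := by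
  intro ws
  induction ws with
  | nil => intro h; exact absurd rfl h
  | cons w ws' ih =>
    intro _ tokens pending hinv
    cases ws' with
    | nil =>
      simp only [finishF,
        show ([w] : List (List Char)).dropLast = [] from rfl,
        show ([w] : List (List Char)).getLastD [] = w from rfl, List.append_nil]
      have hcond : ¬ (1 ≤ n ∧ n ≤ ((pending.length : Nat) : Int)) := by
        rintro ⟨h1, h2⟩; have := hinv h1; omega
      rw [grpSpec, dif_neg hcond]
      split_ifs with hg
      · rw [joinsp_append_single]
      · simp
    | cons w' ws'' =>
      rw [finishF_cons n _ w _ (by simp)]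
      by_cases hcnt : (pending.length : Int) = n - 1
      · have hn1 : 1 ≤ n := by omega
        rw [show tokBstep n (tokens, joinTrail pending, (pending.length : Int)) w
              = (tokens ++ [joinTrail pending ++ w], [], 0) from by simp [tokBstep, hcnt]]
        have hih := ih (by simp) (tokens ++ [joinTrail pending ++ w]) []
          (by intro _; simp; omega)
        simp only [show joinTrail ([] : List (List Char)) = [] from rfl, List.length_nil,
          Nat.cast_zero, List.nil_append] at hih
        rw [hih]
        rw [show (w :: w' :: ws'').dropLast = w :: (w' :: ws'').dropLast from rfl,
          getLastD_cons_of_ne w (w' :: ws'') (by simp)]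
        have hcond : 1 ≤ n ∧ n ≤ (((pending ++ w :: (w' :: ws'').dropLast)).length : Int) :=
          ⟨hn1, by simp only [List.length_append, List.length_cons]; push_cast; omega⟩
        conv_rhs => rw [grpSpec]
        rw [dif_pos hcond]
        have hsplit : pending ++ w :: (w' :: ws'').dropLast = (pending ++ [w]) ++ (w' :: ws'').dropLast := by
          simp
        have hlen : (pending ++ [w]).length = n.toNat := by
          simp only [List.length_append, List.length_singleton]; omega
        rw [hsplit]
        rw [show ((pending ++ [w]) ++ (w' :: ws'').dropLast).take n.toNat = pending ++ [w] from by
            rw [← hlen]; exact List.take_left]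
        rw [show ((pending ++ [w]) ++ (w' :: ws'').dropLast).drop n.toNat = (w' :: ws'').dropLast from by
            rw [← hlen]; exact List.drop_left]
        rw [joinsp_append_single]
        simp
      · rw [show tokBstep n (tokens, joinTrail pending, (pending.length : Int)) w
              = (tokens, joinTrail pending ++ w ++ [' '], (pending.length : Int) + 1) from by
            simp [tokBstep, hcnt]]
        have hb : joinTrail pending ++ w ++ [' '] = joinTrail (pending ++ [w]) := by
          simp [joinTrail]
        have hl : ((pending.length : Int) + 1) = (((pending ++ [w]).length : Nat) : Int) := by
          simp
        rw [hb, hl]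
        have hih := ih (by simp) tokens (pending ++ [w])
          (by intro h1; have := hinv h1; simp only [List.length_append, List.length_singleton]
              push_cast; push_cast at this; omega)
        rw [hih]
        rw [show (w :: w' :: ws'').dropLast = w :: (w' :: ws'').dropLast from rfl,
          getLastD_cons_of_ne w (w' :: ws'') (by simp)]
        simp

-- ===== VERDICT (by name: the statement is the Claim_ definition above) =====
theorem tokenize_by_words_spec : Claim_equal_tokenize_by_words := by
  intro text n _
  unfold Spec_tokenize_by_words tokenize_by_words tokenize_by_words_alt
  rw [replace_newline, splitOn_space]
  refine congrArg (List.map String.ofList) ?_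
  rw [A_fold_eq n text.toList [] [] [] 0 (by simp) (by simp)]
  have h1 := finish_grp n (pySplit [] (text.toList.map pvSubst)) (pySplit_ne_nil [] _) [] []
    (by intro _; simp; omega)
  simp only [joinTrail, List.map_nil, List.flatten_nil, List.length_nil, Nat.cast_zero,
    List.nil_append] at h1
  rw [h1]
  have h2 := tokChunks_spec n (pySplit [] (text.toList.map pvSubst)).dropLast
    ((pySplit [] (text.toList.map pvSubst)).getLastD []) 0 []
  simp only [List.drop_zero, List.nil_append] at h2
  rw [h2]
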